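-- pv_equiv track=rewrite | github.com/theptrk/arc-prize-2024 | synthesis.py | scale_grid
-- ===== SOURCE A (Python) =====
-- def scale_grid(grid, n=3):
--     """scales the entire grid"""
--     n_rows = len(grid)
--     n_cols = len(grid[0])
--     new_grid = [[0] * (n_cols * n) for _ in range(n_rows * n)]
--
--     for i in range(n_rows):
--         for j in range(n_cols):
--             val = grid[i][j]
--             # paint
--             s_i_start = i * n
--             s_j_start = j * n
--             for s_i in range(s_i_start, s_i_start + n):
--                 for s_j in range(s_j_start, s_j_start + n):
--                     new_grid[s_i][s_j] = grid[i][j]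
--
--     return new_grid
-- ===== SOURCE B (Python) =====
-- def scale_grid(grid, n=3):
--     """scales the entire grid"""
--     out = []
--     for row in grid:
--         scaled_row = [v for v in row for _ in range(n)]
--         out += [list(scaled_row) for _ in range(n)]
--     return out
-- ===== Notes on version B (the rewrite author's own statement) =====
-- stated objective: simpler
-- what changed: Replaces the pre-allocated zero matrix and four nested index-painting loops by a row-wise decomposition: build each scaled row once by replicating cells, then append n copies of it; each output cell is produced once by list replication instead of an individual indexed store.
-- outside the precondition, e.g. on scale_grid([[1], [2, 3]], 1): A returns [[1], [2]], B returns [[1], [2, 3]]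
import Mathlib
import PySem

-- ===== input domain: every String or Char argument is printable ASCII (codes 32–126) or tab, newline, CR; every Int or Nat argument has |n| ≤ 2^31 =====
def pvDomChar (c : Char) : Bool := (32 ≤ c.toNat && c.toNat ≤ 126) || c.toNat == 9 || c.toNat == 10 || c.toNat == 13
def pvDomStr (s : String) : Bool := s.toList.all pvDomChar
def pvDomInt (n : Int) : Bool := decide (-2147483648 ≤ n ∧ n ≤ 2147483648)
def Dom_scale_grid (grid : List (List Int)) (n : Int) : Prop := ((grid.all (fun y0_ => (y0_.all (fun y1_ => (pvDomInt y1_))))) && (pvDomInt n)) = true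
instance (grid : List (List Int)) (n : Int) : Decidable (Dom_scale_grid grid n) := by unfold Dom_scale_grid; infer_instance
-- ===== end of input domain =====

-- B replaces A's pre-allocated zero matrix and four nested block-painting loops by a
-- row-wise decomposition (build each scaled row once, then append n copies); objective: simpler.

-- ===== PORT A =====
-- new_grid[s_i][s_j] = v; exact for the nonnegative in-range indices the algorithm uses
-- (on an out-of-range write Python raises; such inputs are outside Pre_scale_grid).
def pySet2 (g : List (List Int)) (i j v : Int) : List (List Int) :=
  g.set i.toNat ((g.getD i.toNat []).set j.toNat v)

def scale_grid (grid : List (List Int)) (n : Int) : List (List Int) :=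
  let n_rows : Int := grid.length
  let n_cols : Int := ((PySem.List.pyGet? grid 0).getD []).length
  let new_grid : List (List Int) :=
    (PySem.List.pyRange 0 (n_rows * n) 1).map (fun _ => List.replicate (n_cols * n).toNat 0)
  (PySem.List.pyRange 0 n_rows 1).foldl (fun g i =>
    (PySem.List.pyRange 0 n_cols 1).foldl (fun g j =>
      -- val = grid[i][j]; exact for the nonnegative in-range indices reached under Pre_
      let val : Int := ((PySem.List.pyGet? grid i).getD []).getD j.toNat 0
      let s_i_start := i * n
      let s_j_start := j * n
      (PySem.List.pyRange s_i_start (s_i_start + n) 1).foldl (fun g s_i =>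
        (PySem.List.pyRange s_j_start (s_j_start + n) 1).foldl (fun g s_j =>
          pySet2 g s_i s_j val) g) g) g) new_grid

-- ===== PORT B =====
def scale_grid_alt (grid : List (List Int)) (n : Int) : List (List Int) :=
  grid.foldl (fun out row =>
    let scaled_row := row.flatMap (fun v => List.replicate n.toNat v)
    out ++ List.replicate n.toNat scaled_row) []

-- ===== PRECONDITION & SPEC =====
-- Pre_ excludes inputs on which A raises IndexError (the empty grid, a row shorter than the
-- first row) and, for n > 0, non-rectangular grids whose rows are longer than the first row,
-- where A silently truncates those rows to the first row's width — an artefact of the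
-- n_cols = len(grid[0]) choice (for n ≤ 0 such grids stay inside Pre_: both return []).
def Pre_scale_grid (grid : List (List Int)) (n : Int) : Prop :=
  grid ≠ [] ∧ ∀ row ∈ grid,
    (grid.headD []).length ≤ row.length ∧ (0 < n → row.length = (grid.headD []).length)
instance (grid : List (List Int)) (n : Int) : Decidable (Pre_scale_grid grid n) := by
  unfold Pre_scale_grid; infer_instance
def pvWitness_scale_grid : List (List Int) × Int := ([[1, 2], [3, 4]], 2)

def Spec_scale_grid (grid : List (List Int)) (n : Int) (out : List (List Int)) : Prop := out = scale_grid_alt grid n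
instance (grid : List (List Int)) (n : Int) (out : List (List Int)) : Decidable (Spec_scale_grid grid n out) := by unfold Spec_scale_grid; infer_instance

-- ===== CLAIM (what is proved, stated in full; the proofs are below) =====
def Claim_equal_scale_grid : Prop := ∀ (grid : List (List Int)) (n : Int), Dom_scale_grid grid n → Pre_scale_grid grid n → Spec_scale_grid grid n (scale_grid grid n)
-- ===== LEMMAS AND PROOFS =====

-- one cell of a scaled row / one block of scaled rows
def rowScale (row : List Int) (nn : Nat) : List Int := row.flatMap (fun v => List.replicate nn v)
def blockScale (l : List (List Int)) (nn : Nat) : List (List Int) :=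
  l.flatMap (fun row => List.replicate nn (rowScale row nn))

lemma set_append_len {α : Type} (A : List α) (m : α) (t : List α) (v : α) :
    (A ++ m :: t).set A.length v = A ++ v :: t := by
  induction A with
  | nil => rfl
  | cons a A ih => simp [List.set, ih]

lemma getD_append_len {α : Type} (A : List α) (m : α) (t : List α) (d : α) :
    (A ++ m :: t).getD A.length d = m := by
  induction A with
  | nil => rfl
  | cons a A ih => simpa [List.getD] using ih

lemma length_rowScale (row : List Int) (nn : Nat) : (rowScale row nn).length = row.length * nn := by
  induction row with
  | nil => simp [rowScale]
  | cons v t ih => simp [rowScale, List.flatMap_cons, Nat.succ_mul] at ih ⊢; omega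

lemma length_blockScale (l : List (List Int)) (nn : Nat) : (blockScale l nn).length = l.length * nn := by
  induction l with
  | nil => simp [blockScale]
  | cons r t ih => simp [blockScale, List.flatMap_cons, Nat.succ_mul] at ih ⊢; omega

lemma rowScale_append (a b : List Int) (nn : Nat) :
    rowScale (a ++ b) nn = rowScale a nn ++ rowScale b nn := by
  simp [rowScale, List.flatMap_append]

lemma blockScale_append (a b : List (List Int)) (nn : Nat) :
    blockScale (a ++ b) nn = blockScale a nn ++ blockScale b nn := by
  simp [blockScale, List.flatMap_append]

-- generic "paint a segment": folding a body that rewrites the element at the current index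
-- over the index range covering M maps F over M
lemma Lseg {α : Type} (b : List α → Int → List α) (F : α → α)
    (hb : ∀ (A' : List α) (m : α) (t : List α) (a' : Int), 0 ≤ a' → a'.toNat = A'.length →
        b (A' ++ m :: t) a' = A' ++ F m :: t) :
    ∀ (M A B : List α) (a : Int), 0 ≤ a → a.toNat = A.length →
    (PySem.List.pyRange a (a + M.length) 1).foldl b (A ++ M ++ B) = A ++ M.map F ++ B := by
  intro M
  induction M with
  | nil =>
    intro A B a ha hA
    have h0 : a + ((([] : List α).length : Nat) : Int) = a := by simp
    rw [h0, PySem.List.pyRange_one_eq_nil le_rfl]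
    simp
  | cons m t ih =>
    intro A B a ha hA
    have hlt : a < a + ((m :: t).length : Int) := by simp only [List.length_cons]; push_cast; omega
    rw [PySem.List.pyRange_one_cons hlt]
    simp only [List.foldl_cons]
    have h1 : (A ++ (m :: t) ++ B) = A ++ m :: (t ++ B) := by simp
    rw [h1, hb A m (t ++ B) a ha hA]
    have h2 : a + ((m :: t).length : Int) = (a + 1) + (t.length : Int) := by
      simp only [List.length_cons]; push_cast; omega
    rw [h2]
    have h3 : (A ++ F m :: (t ++ B)) = (A ++ [F m]) ++ t ++ B := by simp
    rw [h3, ih (A ++ [F m]) B (a + 1) (by omega) (by simp; omega)]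
    simp

lemma getD_set_self {α : Type} : ∀ (g : List α) (s : Nat) (x d : α), s < g.length →
    (g.set s x).getD s d = x := by
  intro g
  induction g with
  | nil => intro s x d hs; simp at hs
  | cons a g ih =>
    intro s x d hs
    cases s with
    | zero => rfl
    | succ s => simpa [List.set, List.getD] using ih s x d (by simpa using hs)

lemma set_getD_self {α : Type} : ∀ (g : List α) (s : Nat) (d : α), s < g.length →
    g.set s (g.getD s d) = g := by
  intro g
  induction g with
  | nil => intro s d hs; simp at hs
  | cons a g ih =>
    intro s d hs
    cases s with
    | zero => rfl
    | succ s => simpa [List.set, List.getD] using ih s d (by simpa using hs)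

-- the innermost two loops (fixed row index s, set positions one by one) act on row s only
lemma Lsame (l : List Int) : ∀ (g : List (List Int)) (s : Nat) (v : Int), s < g.length →
    l.foldl (fun g sj => g.set s ((g.getD s []).set sj.toNat v)) g
      = g.set s (l.foldl (fun r sj => r.set sj.toNat v) (g.getD s [])) := by
  induction l with
  | nil => intro g s v hs; simp only [List.foldl_nil]; rw [set_getD_self g s [] hs]
  | cons x l ih =>
    intro g s v hs
    simp only [List.foldl_cons]
    rw [ih _ s v (by simpa using hs)]
    rw [getD_set_self g s _ [] hs, List.set_set]

lemma paint_seg (v : Int) (M A B : List Int) (a : Int) (ha : 0 ≤ a) (hA : a.toNat = A.length) :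
    (PySem.List.pyRange a (a + (M.length : Int)) 1).foldl (fun r sj => r.set sj.toNat v) (A ++ M ++ B)
      = A ++ List.replicate M.length v ++ B := by
  have h := Lseg (fun r sj => r.set sj.toNat v) (fun _ => v)
      (by intro A' m t a' ha' hA'
          simp only []
          rw [hA', set_append_len]) M A B a ha hA
  simpa using h

-- one j-step: the two innermost loops paint value v into columns [j*n, j*n+n) of each
-- of the nn block rows
lemma Lblock (n : Int) (nn : Nat) (hnn : n = (nn : Int)) (v : Int)
    (P Q : List (List Int)) (Ar Br : List Int) (j : Int)
    (hjnn : 0 ≤ j * n) (hjn : (j * n).toNat = Ar.length) :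
    (PySem.List.pyRange ((P.length : Nat) : Int) (((P.length : Nat) : Int) + n) 1).foldl
      (fun g s_i =>
        (PySem.List.pyRange (j * n) (j * n + n) 1).foldl
          (fun g s_j => pySet2 g s_i s_j v) g)
      (P ++ List.replicate nn (Ar ++ List.replicate nn 0 ++ Br) ++ Q)
    = P ++ List.replicate nn (Ar ++ List.replicate nn v ++ Br) ++ Q := by
  have hG : ∀ (A' : List (List Int)) (m : List Int) (t : List (List Int)) (a' : Int),
      0 ≤ a' → a'.toNat = A'.length →
      (PySem.List.pyRange (j * n) (j * n + n) 1).foldl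
        (fun g s_j => pySet2 g a' s_j v) (A' ++ m :: t)
      = A' ++ ((PySem.List.pyRange (j * n) (j * n + n) 1).foldl
          (fun r s_j => r.set s_j.toNat v) m) :: t := by
    intro A' m t a' ha' hA'
    simp only [pySet2]
    rw [hA']
    rw [Lsame _ (A' ++ m :: t) A'.length v (by simp)]
    rw [getD_append_len, set_append_len]
  have hmain := Lseg
      (fun g s_i => (PySem.List.pyRange (j * n) (j * n + n) 1).foldl
        (fun g s_j => pySet2 g s_i s_j v) g)
      (fun r => (PySem.List.pyRange (j * n) (j * n + n) 1).foldl
        (fun r s_j => r.set s_j.toNat v) r)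
      (by intro A' m t a' ha' hA'; exact hG A' m t a' ha' hA')
      (List.replicate nn (Ar ++ List.replicate nn 0 ++ Br)) P Q
      ((P.length : Nat) : Int) (by positivity) (by simp)
  have hlen : ((List.replicate nn (Ar ++ List.replicate nn 0 ++ Br)).length : Int) = n := by
    simp [hnn]
  rw [hlen] at hmain
  rw [hmain, List.map_replicate]
  have hpaint : (PySem.List.pyRange (j * n) (j * n + n) 1).foldl
      (fun r s_j => r.set s_j.toNat v) (Ar ++ List.replicate nn 0 ++ Br)
      = Ar ++ List.replicate nn v ++ Br := by
    have h := paint_seg v (List.replicate nn 0) Ar Br (j * n) hjnn (by simpa using hjn)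
    have hend : j * n + ((List.replicate nn (0:Int)).length : Int) = j * n + n := by
      simp [hnn]
    rw [hend] at h
    simpa using h
  rw [hpaint]

-- the j loop: paints one whole block of nn rows from a zero-suffix state to the fully
-- scaled row, one cell of `row` at a time
lemma Lj (n : Int) (nn : Nat) (hnn : n = (nn : Int)) (row : List Int) :
    ∀ (rest done : List Int), row = done ++ rest →
    ∀ (P Q : List (List Int)),
    (PySem.List.pyRange ((done.length : Nat) : Int)
        (((done.length : Nat) : Int) + ((rest.length : Nat) : Int)) 1).foldl
      (fun g j =>
        (PySem.List.pyRange ((P.length : Nat) : Int) (((P.length : Nat) : Int) + n) 1).foldl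
          (fun g s_i =>
            (PySem.List.pyRange (j * n) (j * n + n) 1).foldl
              (fun g s_j => pySet2 g s_i s_j (row.getD j.toNat 0)) g) g)
      (P ++ List.replicate nn (rowScale done nn ++ List.replicate (rest.length * nn) 0) ++ Q)
    = P ++ List.replicate nn (rowScale row nn) ++ Q := by
  intro rest
  induction rest with
  | nil =>
    intro done hrow P Q
    have h0 : ((done.length : Nat) : Int) + ((([] : List Int).length : Nat) : Int)
        = ((done.length : Nat) : Int) := by simp
    rw [h0, PySem.List.pyRange_one_eq_nil le_rfl]
    subst hrow
    simp
  | cons m t ih =>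
    intro done hrow P Q
    have hlt : ((done.length : Nat) : Int) <
        ((done.length : Nat) : Int) + (((m :: t).length : Nat) : Int) := by
      simp only [List.length_cons]; push_cast; omega
    rw [PySem.List.pyRange_one_cons hlt, List.foldl_cons]
    have hval : row.getD (((done.length : Nat) : Int)).toNat 0 = m := by
      subst hrow; simp [getD_append_len]
    simp only [hval]
    have hsplit : List.replicate ((m :: t).length * nn) (0 : Int)
        = List.replicate nn 0 ++ List.replicate (t.length * nn) 0 := by
      rw [show (m :: t).length * nn = nn + t.length * nn by simp [List.length_cons]; ring,
        List.replicate_add]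
    rw [hsplit, ← List.append_assoc]
    rw [Lblock n nn hnn m P Q (rowScale done nn) (List.replicate (t.length * nn) 0)
      ((done.length : Nat) : Int)
      (by rw [hnn, ← Nat.cast_mul]; exact Int.natCast_nonneg _)
      (by rw [hnn, ← Nat.cast_mul, Int.toNat_natCast, length_rowScale])]
    have hmerge : rowScale done nn ++ List.replicate nn m = rowScale (done ++ [m]) nn := by
      rw [rowScale_append]; simp [rowScale]
    rw [List.append_assoc, hmerge]
    have hrange : PySem.List.pyRange (((done.length : Nat) : Int) + 1)
        (((done.length : Nat) : Int) + (((m :: t).length : Nat) : Int)) 1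
        = PySem.List.pyRange (((done ++ [m]).length : Nat) : Int)
          ((((done ++ [m]).length : Nat) : Int) + ((t.length : Nat) : Int)) 1 := by
      congr 1 <;> (simp only [List.length_append, List.length_cons, List.length_nil]; push_cast; ring)
    rw [hrange, ← List.append_assoc]
    exact ih (done ++ [m]) (by simp [hrow]) P Q

-- the i loop: scales one grid row (one block of nn output rows) per step
lemma Li (n : Int) (nn : Nat) (hnn : n = (nn : Int)) (c : Nat) (grid : List (List Int)) :
    ∀ (gs done : List (List Int)), grid = done ++ gs → (∀ row ∈ gs, row.length = c) →
    (PySem.List.pyRange ((done.length : Nat) : Int)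
        (((done.length : Nat) : Int) + ((gs.length : Nat) : Int)) 1).foldl
      (fun g i =>
        (PySem.List.pyRange 0 ((c : Nat) : Int) 1).foldl
          (fun g j =>
            (PySem.List.pyRange (i * n) (i * n + n) 1).foldl
              (fun g s_i =>
                (PySem.List.pyRange (j * n) (j * n + n) 1).foldl
                  (fun g s_j => pySet2 g s_i s_j
                    (((PySem.List.pyGet? grid i).getD []).getD j.toNat 0)) g) g) g)
      (blockScale done nn ++ List.replicate (gs.length * nn) (List.replicate (c * nn) 0))
    = blockScale done nn ++ blockScale gs nn := by
  intro gs
  induction gs with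
  | nil =>
    intro done hg hc
    have h0 : ((done.length : Nat) : Int) + ((([] : List (List Int)).length : Nat) : Int)
        = ((done.length : Nat) : Int) := by simp
    rw [h0, PySem.List.pyRange_one_eq_nil le_rfl]
    simp [blockScale]
  | cons row gs' ih =>
    intro done hg hc
    have hlt : ((done.length : Nat) : Int) <
        ((done.length : Nat) : Int) + (((row :: gs').length : Nat) : Int) := by
      simp only [List.length_cons]; push_cast; omega
    rw [PySem.List.pyRange_one_cons hlt, List.foldl_cons]
    have hget : PySem.List.pyGet? grid ((done.length : Nat) : Int) = some row := by
      rw [hg]; exact PySem.List.pyGet?_append_length done gs' row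
    simp only [hget, Option.getD_some]
    -- split the zero blocks and rewrite the first one into Lj's initial shape
    have hsplit : List.replicate ((row :: gs').length * nn) (List.replicate (c * nn) (0 : Int))
        = List.replicate nn (List.replicate (c * nn) 0)
          ++ List.replicate (gs'.length * nn) (List.replicate (c * nn) 0) := by
      rw [show (row :: gs').length * nn = nn + gs'.length * nn by simp [List.length_cons]; ring,
        List.replicate_add]
    rw [hsplit, ← List.append_assoc]
    have hcrow : row.length = c := hc row (by simp)
    have hP : ((done.length : Nat) : Int) * n
        = (((blockScale done nn).length : Nat) : Int) := by
      rw [hnn, length_blockScale, ← Nat.cast_mul]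
    have hLj := Lj n nn hnn row row [] rfl (blockScale done nn)
      (List.replicate (gs'.length * nn) (List.replicate (c * nn) 0))
    rw [show rowScale ([] : List Int) nn = [] from rfl, List.nil_append, hcrow, ← hP] at hLj
    simp only [List.length_nil, Nat.cast_zero, zero_add] at hLj
    rw [hLj]
    have hmerge : blockScale done nn ++ List.replicate nn (rowScale row nn)
        = blockScale (done ++ [row]) nn := by
      rw [blockScale_append]; simp [blockScale]
    rw [hmerge]
    have hrange : PySem.List.pyRange (((done.length : Nat) : Int) + 1)
        (((done.length : Nat) : Int) + (((row :: gs').length : Nat) : Int)) 1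
        = PySem.List.pyRange (((done ++ [row]).length : Nat) : Int)
          ((((done ++ [row]).length : Nat) : Int) + ((gs'.length : Nat) : Int)) 1 := by
      congr 1 <;> (simp only [List.length_append, List.length_cons, List.length_nil]; push_cast; ring)
    rw [hrange]
    rw [ih (done ++ [row]) (by simp [hg]) (fun r hr => hc r (by simp [hr])),
      blockScale_append]
    simp [blockScale]

lemma foldl_id_of {α β : Type} (f : α → β → α) (h : ∀ a b, f a b = a) :
    ∀ (l : List β) (a : α), l.foldl f a = a := by
  intro l
  induction l with
  | nil => intro a; rfl
  | cons x t ih => intro a; rw [List.foldl_cons, h]; exact ih a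

lemma map_const_list {α β : Type} (l : List α) (x : β) :
    l.map (fun _ => x) = List.replicate l.length x := by
  induction l with
  | nil => rfl
  | cons y t ih => simp [ih, List.replicate_succ]

lemma alt_eq (n : Int) :
    ∀ (l : List (List Int)) (acc : List (List Int)),
    l.foldl (fun out row =>
      out ++ List.replicate n.toNat (row.flatMap (fun v => List.replicate n.toNat v))) acc
    = acc ++ blockScale l n.toNat := by
  intro l
  induction l with
  | nil => intro acc; simp [blockScale]
  | cons row t ih =>
    intro acc
    rw [List.foldl_cons, ih]
    simp [blockScale, rowScale]

theorem scale_grid_spec : Claim_equal_scale_grid := by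
  intro grid n _ hpre
  obtain ⟨hne, hall⟩ := hpre
  unfold Spec_scale_grid
  have hB : scale_grid_alt grid n = blockScale grid n.toNat := by
    have h := alt_eq n grid []
    simpa [scale_grid_alt] using h
  rw [hB]
  rcases grid with _ | ⟨h0, t⟩
  · exact absurd rfl hne
  rcases (by omega : n ≤ 0 ∨ 0 < n) with hn | hn
  · -- n ≤ 0 : the painted ranges are empty, the pre-built grid is empty, both sides are []
    have hnt : n.toNat = 0 := by omega
    simp only [scale_grid]
    have hmn : (((h0 :: t).length : Nat) : Int) * n ≤ 0 :=
      mul_nonpos_of_nonneg_of_nonpos (Int.natCast_nonneg _) hn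
    rw [PySem.List.pyRange_one_eq_nil hmn, List.map_nil]
    rw [foldl_id_of _ (by
      intro g i
      apply foldl_id_of
      intro g' j
      rw [PySem.List.pyRange_one_eq_nil (by linarith : i * n + n ≤ i * n)]
      rfl)]
    simp [blockScale, hnt]
  · -- n > 0 : the nested painting produces exactly the row-wise scaling
    have hnn : n = ((n.toNat : Nat) : Int) := by omega
    simp only [scale_grid]
    have hget0 : (PySem.List.pyGet? (h0 :: t) 0).getD [] = h0 := by
      rw [PySem.List.pyGet?_zero_cons]; rfl
    simp only [hget0]
    have hi2 : ((((h0.length : Nat) : Int)) * n).toNat = h0.length * n.toNat := by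
      conv_lhs => rw [hnn, ← Nat.cast_mul, Int.toNat_natCast]
    simp only [hi2]
    have hi1 : (((h0 :: t).length : Nat) : Int) * n = (((h0 :: t).length * n.toNat : Nat) : Int) := by
      conv_lhs => rw [hnn]
      push_cast; ring
    rw [hi1, map_const_list, PySem.List.length_pyRange_one]
    have hlen : ((((h0 :: t).length * n.toNat : Nat) : Int) - 0).toNat
        = (h0 :: t).length * n.toNat := by omega
    rw [hlen]
    have hLi := Li n n.toNat hnn h0.length (h0 :: t) (h0 :: t) [] rfl
      (fun r hr => by simpa using (hall r hr).2 hn)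
    simp only [List.length_nil, Nat.cast_zero, zero_add,
      show blockScale [] n.toNat = [] from rfl, List.nil_append] at hLi
    exact hLi
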